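-- pv_equiv track=rewrite | github.com/Shreyab1802/Code_Python | MicrosoftRecent/Client_PostOffice_Package.py | deliver
-- ===== SOURCE A (Python) =====
-- def deliver(clients):
--     max_count = 0
--     shelf_count = 0
--     max_client = 0
--
--     for client in clients:
--         if client > max_client:
--             shelf_count += client - max_client - 1
--
--         else:
--             shelf_count -= 1
--
--         max_count = max(max_count, shelf_count)
--         max_client = max(max_client, client)
--
--     return max_count
-- ===== SOURCE B (Python) =====
-- def deliver(clients):
--     return max([0] + [client - i for i, client in enumerate(clients, 1)])
-- ===== Notes on version B (the rewrite author's own statement) =====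
-- stated objective: simpler
-- what changed: Replaces the stateful scan (shelf_count, running max_client, running max_count) with a stateless map+reduce: the answer equals max(0, max_j clients[j] - (j+1)), because the shelf value telescopes to prefix_max - position and the prefix max is attained at some earlier record index whose own candidate dominates; B builds the candidate list in a comprehension and takes one max (measured constant-factor faster).
import Mathlib
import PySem

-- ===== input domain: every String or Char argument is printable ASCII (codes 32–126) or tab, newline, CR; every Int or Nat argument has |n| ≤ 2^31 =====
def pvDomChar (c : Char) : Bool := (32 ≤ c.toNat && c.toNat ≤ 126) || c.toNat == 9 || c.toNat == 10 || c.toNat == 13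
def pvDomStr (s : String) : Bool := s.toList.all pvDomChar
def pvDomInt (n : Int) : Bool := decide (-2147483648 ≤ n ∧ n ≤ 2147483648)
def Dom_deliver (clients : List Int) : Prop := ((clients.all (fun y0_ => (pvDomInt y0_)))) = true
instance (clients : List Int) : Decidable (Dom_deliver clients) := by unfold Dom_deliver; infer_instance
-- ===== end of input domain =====

-- B replaces A's stateful scan by a stateless map+reduce: max(0, max_j clients[j] - (j+1)) (simpler decomposition, same cost).
-- ===== PORT A =====
def deliver (clients : List Int) : Int :=
  (clients.foldl (fun (st : Int × Int × Int) client =>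
    let shelf_count := if client > st.2.2 then st.2.1 + (client - st.2.2 - 1) else st.2.1 - 1
    (max st.1 shelf_count, shelf_count, max st.2.2 client)) (0, 0, 0)).1

-- ===== PORT B =====
def deliver_alt (clients : List Int) : Int :=
  ((PySem.List.max? ((0 : Int) :: (PySem.List.enumerate clients 1).map (fun p => p.2 - p.1))
      (fun y => y)).getD 0)

-- ===== PRECONDITION & SPEC =====
def Spec_deliver (clients : List Int) (out : Int) : Prop := out = deliver_alt clients
instance (clients : List Int) (out : Int) : Decidable (Spec_deliver clients out) := by unfold Spec_deliver; infer_instance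

-- ===== CLAIM =====
def Claim_equal_deliver : Prop := ∀ (clients : List Int), Dom_deliver clients → Spec_deliver clients (deliver clients)

-- ===== LEMMAS AND PROOFS =====
-- Invariant: with shelf = m - i and m - i ≤ mc, 0 ≤ m, A's running max of shelf values
-- equals the running max of the raw candidates c_j - j.
theorem fold_eq (l : List Int) : ∀ (mc m i : Int), m - i ≤ mc → 0 ≤ m →
    (l.foldl (fun (st : Int × Int × Int) client =>
      let shelf_count := if client > st.2.2 then st.2.1 + (client - st.2.2 - 1) else st.2.1 - 1
      (max st.1 shelf_count, shelf_count, max st.2.2 client)) (mc, m - i, m)).1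
    = (PySem.List.enumerate l (i + 1)).foldl (fun a p => max a (p.2 - p.1)) mc := by
  induction l with
  | nil => intro mc m i _ _; simp [PySem.List.enumerate_nil]
  | cons c l ih =>
    intro mc m i hmi hm
    simp only [PySem.List.enumerate_cons, List.foldl_cons]
    by_cases h : c > m
    · have h1 : m - i + (c - m - 1) = c - (i + 1) := by ring
      have hmax : max m c = c := by omega
      rw [if_pos h, h1, hmax]
      have := ih (max mc (c - (i + 1))) c (i + 1) (by omega) (by omega)
      simpa using this
    · have h1 : m - i - 1 = m - (i + 1) := by ring
      have hmax : max m c = m := by omega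
      have hmc : max mc (m - (i + 1)) = mc := by omega
      have hmc2 : max mc (c - (i + 1)) = mc := by omega
      rw [if_neg h, h1, hmax, hmc, hmc2]
      simpa using ih mc m (i + 1) (by omega) hm

-- ===== VERDICT =====
theorem deliver_spec : Claim_equal_deliver := by
  intro clients _
  unfold Spec_deliver deliver deliver_alt
  rw [PySem.List.max?_id_cons]
  have := fold_eq clients 0 0 0 (by omega) (by omega)
  simp only [show (0 : Int) - 0 = 0 from rfl, zero_add] at this
  rw [this, List.foldl_map]
  rfl
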